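-- pv_equiv track=rewrite | github.com/Gerard003-ecu/apu_filter | app/boole/strategy/sheaf_cohomology_orchestrator.py | _compute_edge_offsets_static
-- ===== SOURCE A (Python) =====
-- from typing import Dict, Final, List, Optional, Tuple, Protocol, runtime_checkable, Any
--
-- def _compute_edge_offsets_static(
--     edge_dims: Dict[int, int],
-- ) -> Dict[int, int]:
--     """Calcula offsets acumulados en C¹ indexados por edge_id.
--
--     El orden es por edge_id creciente para garantizar reproducibilidad
--     determinista del ensamblaje de δ.
--
--     Args:
--         edge_dims: Diccionario {edge_id: dimensión}.
--
--     Returns: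
--         Diccionario {edge_id: offset_en_C1}.
--     """
--     offsets: Dict[int, int] = {}
--     running = 0
--     for edge_id in sorted(edge_dims):
--         offsets[edge_id] = running
--         running += edge_dims[edge_id]
--     return offsets
-- ===== SOURCE B (Python) =====
-- def _compute_edge_offsets_static(edge_dims):
--     """Divide and conquer: recursively compute offsets inside each half of the
--     sorted key list, then shift the right half by the left half's total
--     dimension; no running accumulator is ever threaded through the keys."""
--
--     def go(keys):
--         # returns (list of (key, offset within this block), total dimension of block)
--         n = len(keys)
--         if n == 0:
--             return [], 0
--         if n == 1:
--             k = keys[0]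
--             return [(k, 0)], edge_dims[k]
--         mid = n // 2
--         left, lsize = go(keys[:mid])
--         right, rsize = go(keys[mid:])
--         return left + [(k, off + lsize) for k, off in right], lsize + rsize
--
--     return dict(go(sorted(edge_dims))[0])
-- ===== Notes on version B (the rewrite author's own statement) =====
-- stated objective: alternative
-- what changed: B replaces A's single left-to-right loop with a running accumulator by a divide-and-conquer recursion: offsets are computed independently inside each half of the sorted key list and the right half's block is shifted by the left half's total dimension when the halves are merged.
import Mathlib
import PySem

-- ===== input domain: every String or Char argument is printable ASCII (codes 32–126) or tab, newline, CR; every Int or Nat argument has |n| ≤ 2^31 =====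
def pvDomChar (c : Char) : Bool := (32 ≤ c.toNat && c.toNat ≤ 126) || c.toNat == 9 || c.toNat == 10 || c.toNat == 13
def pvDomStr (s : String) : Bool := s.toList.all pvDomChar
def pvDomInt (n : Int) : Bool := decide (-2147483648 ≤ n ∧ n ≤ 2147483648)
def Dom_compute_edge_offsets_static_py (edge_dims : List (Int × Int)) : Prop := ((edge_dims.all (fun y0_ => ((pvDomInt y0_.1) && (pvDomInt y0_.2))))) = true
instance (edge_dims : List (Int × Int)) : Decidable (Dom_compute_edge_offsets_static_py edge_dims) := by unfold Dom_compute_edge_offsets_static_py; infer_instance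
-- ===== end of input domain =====

-- B replaces A's left-to-right loop with a running accumulator by a divide-and-conquer
-- recursion on the sorted key list (merge halves, shifting the right block by the left
-- block's total dimension); same result and cost, a different algorithm.

-- ===== PORT A =====
-- offsets = {}; running = 0; for edge_id in sorted(edge_dims): offsets[edge_id] = running; running += edge_dims[edge_id]; return offsets
def compute_edge_offsets_static_py (edge_dims : List (Int × Int)) : List (Int × Int) :=
  let d := PySem.Dict.ofList edge_dims
  let loop := (PySem.List.sorted d.keys (fun x => x) false).foldl
    (fun (st : PySem.Dict Int Int × Int) edge_id =>
      (st.1.insert edge_id st.2, st.2 + d.getD edge_id 0))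
    (PySem.Dict.empty, 0)
  loop.1.items

-- ===== PORT B =====
-- go(keys): n==0 -> ([],0); n==1 -> ([(k,0)], edge_dims[k]);
--           else split at n//2, recurse on both halves, shift the right block by lsize
def pvGo (d : PySem.Dict Int Int) : List Int → List (Int × Int) × Int
  | [] => ([], 0)
  | [k] => ([(k, 0)], d.getD k 0)
  | k1 :: k2 :: t =>
    let l := pvGo d ((k1 :: k2 :: t).take ((k1 :: k2 :: t).length / 2))
    let r := pvGo d ((k1 :: k2 :: t).drop ((k1 :: k2 :: t).length / 2))
    (l.1 ++ r.1.map (fun p => (p.1, p.2 + l.2)), l.2 + r.2)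
termination_by ks => ks.length
decreasing_by
  · simp; omega
  · simp; omega

-- return dict(go(sorted(edge_dims))[0])
def compute_edge_offsets_static_py_alt (edge_dims : List (Int × Int)) : List (Int × Int) :=
  let d := PySem.Dict.ofList edge_dims
  (PySem.Dict.ofList (pvGo d (PySem.List.sorted d.keys (fun x => x) false)).1).items

-- ===== PRECONDITION & SPEC =====
def Spec_compute_edge_offsets_static_py (edge_dims : List (Int × Int)) (out : List (Int × Int)) : Prop := out = compute_edge_offsets_static_py_alt edge_dims
instance (edge_dims : List (Int × Int)) (out : List (Int × Int)) : Decidable (Spec_compute_edge_offsets_static_py edge_dims out) := by unfold Spec_compute_edge_offsets_static_py; infer_instance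

-- ===== CLAIM (what is proved, stated in full; the proofs are below) =====
def Claim_equal_compute_edge_offsets_static_py : Prop := ∀ (edge_dims : List (Int × Int)), Dom_compute_edge_offsets_static_py edge_dims → Spec_compute_edge_offsets_static_py edge_dims (compute_edge_offsets_static_py edge_dims)

-- ===== LEMMAS AND PROOFS =====

-- A's result as a list: (key, exclusive running sum) pairs
def pvOffs (d : PySem.Dict Int Int) (r : Int) : List Int → List (Int × Int)
  | [] => []
  | k :: t => (k, r) :: pvOffs d (r + d.getD k 0) t

theorem pvA_items (d : PySem.Dict Int Int) (ks : List Int) (acc : PySem.Dict Int Int) (r : Int)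
    (hnd : ks.Nodup) (hdisj : ∀ k ∈ ks, acc.contains k = false) :
    (ks.foldl (fun (st : PySem.Dict Int Int × Int) k =>
        (st.1.insert k st.2, st.2 + d.getD k 0)) (acc, r)).1.items
      = acc.items ++ pvOffs d r ks := by
  induction ks generalizing acc r with
  | nil => simp [pvOffs]
  | cons k t ih =>
    simp only [List.foldl_cons, pvOffs]
    rw [ih (acc.insert k r) (r + d.getD k 0) hnd.of_cons]
    · rw [PySem.Dict.items_insert_of_not_contains acc r (hdisj k (by simp))]
      simp
    · intro k' hk'
      rw [PySem.Dict.contains_insert acc k k' r]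
      have hne : k' ≠ k := fun h => (List.nodup_cons.mp hnd).1 (h ▸ hk')
      simp [hne, hdisj k' (List.mem_cons_of_mem _ hk')]

theorem pvOffs_fst (d : PySem.Dict Int Int) (ks : List Int) (r : Int) :
    (pvOffs d r ks).map Prod.fst = ks := by
  induction ks generalizing r with
  | nil => rfl
  | cons k t ih => simp [pvOffs, ih]

-- shifting the starting offset shifts every offset
theorem pvOffs_shift (d : PySem.Dict Int Int) (ks : List Int) (r s : Int) :
    pvOffs d (r + s) ks = (pvOffs d r ks).map (fun p => (p.1, p.2 + s)) := by
  induction ks generalizing r with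
  | nil => rfl
  | cons k t ih =>
    simp only [pvOffs, List.map_cons]
    have h : r + s + d.getD k 0 = r + d.getD k 0 + s := by ring
    rw [h, ih]

-- offsets of a concatenation: left block, then right block started at the left total
theorem pvOffs_append (d : PySem.Dict Int Int) (L R : List Int) (r : Int) :
    pvOffs d r (L ++ R) = pvOffs d r L ++ pvOffs d (r + (L.map (fun k => d.getD k 0)).sum) R := by
  induction L generalizing r with
  | nil => simp [pvOffs]
  | cons k t ih =>
    simp only [List.cons_append, pvOffs, List.map_cons, List.sum_cons]
    rw [ih]
    have h : r + d.getD k 0 + (t.map (fun k => d.getD k 0)).sum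
           = r + (d.getD k 0 + (t.map (fun k => d.getD k 0)).sum) := by ring
    rw [h]

-- the divide-and-conquer recursion computes exactly A's (pairs, total) for its block
theorem pvGo_spec (d : PySem.Dict Int Int) (ks : List Int) :
    pvGo d ks = (pvOffs d 0 ks, (ks.map (fun k => d.getD k 0)).sum) := by
  induction ks using pvGo.induct d with
  | case1 => simp [pvGo, pvOffs]
  | case2 k => simp [pvGo, pvOffs]
  | case3 k1 k2 t ihl ihr =>
    rw [pvGo, ihl, ihr]
    simp only
    have hsplit := pvOffs_append d ((k1 :: k2 :: t).take ((k1 :: k2 :: t).length / 2))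
      ((k1 :: k2 :: t).drop ((k1 :: k2 :: t).length / 2)) 0
    rw [List.take_append_drop] at hsplit
    have hshift := pvOffs_shift d ((k1 :: k2 :: t).drop ((k1 :: k2 :: t).length / 2)) 0
      ((((k1 :: k2 :: t).take ((k1 :: k2 :: t).length / 2)).map (fun k => d.getD k 0)).sum)
    rw [zero_add] at hshift
    simp only [Prod.mk.injEq]
    constructor
    · rw [hsplit, zero_add, hshift]
    · rw [show (k1 :: k2 :: t) = (k1 :: k2 :: t).take ((k1 :: k2 :: t).length / 2)
            ++ (k1 :: k2 :: t).drop ((k1 :: k2 :: t).length / 2) from (List.take_append_drop _ _).symm]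
      simp

-- ===== VERDICT (by name: the statement is the Claim_ definition above) =====
theorem compute_edge_offsets_static_py_spec : Claim_equal_compute_edge_offsets_static_py := by
  intro edge_dims _
  show compute_edge_offsets_static_py edge_dims = compute_edge_offsets_static_py_alt edge_dims
  unfold compute_edge_offsets_static_py compute_edge_offsets_static_py_alt
  dsimp only
  set d := PySem.Dict.ofList edge_dims with hd
  set ks := PySem.List.sorted d.keys (fun x => x) false with hks
  have hndk : d.keys.Nodup := PySem.Dict.nodup_keys_ofList edge_dims
  have hnd : ks.Nodup :=
    (PySem.List.sorted_perm d.keys (fun x => x) false).nodup_iff.mpr hndk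
  rw [pvA_items d ks PySem.Dict.empty 0 hnd (fun k _ => PySem.Dict.contains_empty k)]
  have hofl : (PySem.Dict.ofList (pvOffs d 0 ks)).items = pvOffs d 0 ks := by
    have h2 := PySem.Dict.items_foldl_insert_fresh (l := pvOffs d 0 ks)
      (k := Prod.fst) (v := Prod.snd) (d := PySem.Dict.empty)
      (fun a _ => PySem.Dict.contains_empty _) (by rw [pvOffs_fst]; exact hnd)
    simp [PySem.Dict.empty] at h2
    rw [show PySem.Dict.ofList (pvOffs d 0 ks)
          = (pvOffs d 0 ks).foldl (fun d a => d.insert a.1 a.2) PySem.Dict.empty from rfl]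
    simpa using h2
  rw [pvGo_spec]
  dsimp only
  rw [hofl]
  simp [PySem.Dict.empty]
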